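-- pv_equiv track=rewrite | github.com/asayenju/codesignal_practice | char_cascade.py | char_cascade
-- ===== SOURCE A (Python) =====
-- from collections import defaultdict
--
-- def char_cascade(arr):
--     hashmap = defaultdict(str)
--     for words in arr:
--         for i in range(len(words)):
--             hashmap[i] += words[i]
--     s = ""
--     for key in hashmap:
--         s+=hashmap[key]
--     return s
-- ===== SOURCE B (Python) =====
-- def char_cascade(arr):
--     m = max(map(len, arr), default=0)
--     return ''.join(w[j] for j in range(m) for w in arr if j < len(w))
-- ===== Notes on version B (the rewrite author's own statement) =====
-- stated objective: idiomatic
-- what changed: Replaced the defaultdict row-major accumulation (append each word's i-th char to hashmap[i] via string +=, then concatenate the buckets) by a column-major transpose: a single generator walks column indices 0..maxlen-1 yielding the j-th character of every word long enough, joined once; no dict, no mutable string accumulators.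
import Mathlib
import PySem

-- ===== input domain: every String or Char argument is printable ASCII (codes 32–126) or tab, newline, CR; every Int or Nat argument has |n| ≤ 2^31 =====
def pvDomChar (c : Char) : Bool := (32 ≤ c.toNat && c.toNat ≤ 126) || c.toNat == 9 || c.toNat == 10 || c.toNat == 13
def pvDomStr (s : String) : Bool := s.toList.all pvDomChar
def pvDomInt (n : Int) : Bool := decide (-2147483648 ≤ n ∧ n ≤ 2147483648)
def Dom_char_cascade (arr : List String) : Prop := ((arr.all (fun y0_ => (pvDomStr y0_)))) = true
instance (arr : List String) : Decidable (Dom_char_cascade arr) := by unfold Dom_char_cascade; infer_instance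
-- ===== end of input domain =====

-- B replaces A's defaultdict row-major accumulation by a column-major transpose (idiomatic, same cost).

-- ===== PORT A =====
-- inner loop of A: for i in range(len(words)): hashmap[i] += words[i]
-- words[i] is a single character; (pyGet? cs i).toList is [that char] (i ∈ range(len), so pyGet? never misses).
def pvInnerA (cs : List Char) (d : PySem.Dict Int (List Char)) : PySem.Dict Int (List Char) :=
  (PySem.List.pyRange 0 (cs.length : Int)).foldl
    (fun d i => d.insert i (d.getD i [] ++ (PySem.List.pyGet? cs i).toList)) d

def char_cascade (arr : List String) : String :=
  let hashmap := arr.foldl (fun d words => pvInnerA words.toList d) PySem.Dict.empty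
  -- s = ""; for key in hashmap: s += hashmap[key]
  String.mk (hashmap.keys.foldl (fun s k => s ++ hashmap.getD k []) [])

-- ===== PORT B =====
-- m = max(map(len, arr), default=0): max over the lengths with default 0 = fold of max from 0 (lengths ≥ 0)
def pvMax (rows : List (List Char)) : Nat := rows.foldl (fun a r => max a r.length) 0
-- the inner 'for w in arr if j < len(w)' of B's generator, yielding w[j]
def pvCol (rows : List (List Char)) (j : Nat) : List Char := rows.filterMap (fun r => r[j]?)

-- ''.join(w[j] for j in range(m) for w in arr if j < len(w))
def char_cascade_alt (arr : List String) : String :=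
  let rows := arr.map String.toList
  String.mk (((List.range (pvMax rows)).map (pvCol rows)).flatten)

-- ===== PRECONDITION & SPEC =====
def Spec_char_cascade (arr : List String) (out : String) : Prop := out = char_cascade_alt arr
instance (arr : List String) (out : String) : Decidable (Spec_char_cascade arr out) := by unfold Spec_char_cascade; infer_instance

-- ===== CLAIM (what is proved, stated in full; the proofs are below) =====
def Claim_equal_char_cascade : Prop := ∀ (arr : List String), Dom_char_cascade arr → Spec_char_cascade arr (char_cascade arr)

-- ===== LEMMAS AND PROOFS =====

-- A's dict always has items ((0, v 0), …, (M-1, v (M-1))): word positions are inserted in increasing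
-- order, so new keys append at the end and the key list stays 0, 1, …, M-1 in insertion order.

lemma pv_contains_shape (M : Nat) (v : Nat → List Char) (d : PySem.Dict Int (List Char))
    (hd : d.items = (List.range M).map (fun (j : Nat) => ((j : Int), v j))) (i : Nat) :
    d.contains (i : Int) = decide (i < M) := by
  simp [PySem.Dict.contains, hd, List.any_eq, List.mem_range]

lemma pv_getD_shape (M : Nat) (v : Nat → List Char) (d : PySem.Dict Int (List Char))
    (hd : d.items = (List.range M).map (fun (j : Nat) => ((j : Int), v j))) (i : Nat) (hi : i < M) :
    d.getD (i : Int) [] = v i := by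
  apply PySem.Dict.getD_of_mem_items (d := d) (k := (i:Int)) (v := v i)
  · rw [hd]; exact List.mem_map.mpr ⟨i, List.mem_range.mpr hi, rfl⟩
  · have : d.keys = (List.range M).map (fun (j : Nat) => (j : Int)) := by
      simp [PySem.Dict.keys, hd, List.map_map]
    rw [this]
    exact List.Nodup.map (fun a b h => by omega) List.nodup_range

-- one 'hashmap[i] += x' step on a dict of that shape (i ≤ M: overwrite in place, or append at the end)
lemma pv_insert_step (M : Nat) (v : Nat → List Char) (i : Nat) (x : List Char)
    (d : PySem.Dict Int (List Char))
    (hd : d.items = (List.range M).map (fun (j : Nat) => ((j : Int), v j))) (hi : i ≤ M) :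
    (d.insert (i : Int) (d.getD (i : Int) [] ++ x)).items
    = (List.range (max M (i + 1))).map
        (fun (j : Nat) => ((j : Int), if j = i then (if i < M then v i else []) ++ x else v j)) := by
  by_cases h : i < M
  · have hc : d.contains (i : Int) = true := by rw [pv_contains_shape M v d hd]; simp [h]
    rw [PySem.Dict.items_insert_of_contains d _ hc, hd, List.map_map,
        pv_getD_shape M v d hd i h, Nat.max_eq_left (by omega)]
    apply List.map_congr_left
    intro j hj
    simp only [Function.comp, beq_iff_eq, Int.natCast_inj]
    by_cases hji : j = i <;> simp [hji, h]
  · have hii : i = M := by omega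
    subst hii
    have hc : d.contains (i : Int) = false := by rw [pv_contains_shape i v d hd]; simp
    rw [PySem.Dict.items_insert_of_not_contains d _ hc,
        PySem.Dict.getD_of_not_contains d _ hc, hd,
        Nat.max_eq_right (by omega), List.range_succ, List.map_append]
    congr 1
    · apply List.map_congr_left
      intro j hj
      have : j ≠ i := by simp at hj; omega
      simp [this]
    · simp

-- effect of A's whole inner loop over indices 0 … n-1 of one word
lemma pv_inner_fold (cs : List Char) (M : Nat) (v : Nat → List Char) (n : Nat)
    (d : PySem.Dict Int (List Char))
    (hd : d.items = (List.range M).map (fun (j : Nat) => ((j : Int), v j))) :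
    ((PySem.List.pyRange 0 (n : Int)).foldl
       (fun d i => d.insert i (d.getD i [] ++ (PySem.List.pyGet? cs i).toList)) d).items
    = (List.range (max M n)).map
        (fun (j : Nat) => ((j : Int),
          (if j < M then v j else []) ++ (if j < n then (PySem.List.pyGet? cs (j : Int)).toList else []))) := by
  induction n with
  | zero =>
    rw [PySem.List.pyRange_one_eq_nil (by norm_num)]
    simp only [List.foldl_nil, hd, Nat.max_zero]
    apply List.map_congr_left
    intro j hj
    simp at hj
    simp [hj]
  | succ n ih =>
    have hcast : ((n + 1 : Nat) : Int) = (n : Int) + 1 := by push_cast; ring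
    rw [hcast, PySem.List.pyRange_one_succ_right (by positivity), List.foldl_concat]
    rw [pv_insert_step (max M n) _ n _ _ ih (by omega)]
    have hmax : max (max M n) (n + 1) = max M (n + 1) := by omega
    rw [hmax]
    apply List.map_congr_left
    intro j hj
    simp only [List.mem_range] at hj
    by_cases hji : j = n
    · subst hji
      have hmm : (j < max M j) ↔ j < M := by omega
      by_cases h2 : j < M <;> simp [hmm, h2]
    · have h3 : (j < n) ↔ (j < n + 1) := by omega
      simp [hji, h3]

lemma pv_col_past (rows : List (List Char)) (j : Nat) (h : pvMax rows ≤ j) :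
    pvCol rows j = [] := by
  apply List.filterMap_eq_nil_iff.mpr
  intro r hr
  have := (PySem.List.le_foldl_max (rows.map List.length) 0).2 r.length (List.mem_map_of_mem hr)
  have hlen : r.length ≤ pvMax rows := by
    unfold pvMax
    rw [List.foldl_map] at this
    exact this
  exact List.getElem?_eq_none (by omega)

lemma pv_max_concat (rows : List (List Char)) (cs : List Char) :
    pvMax (rows ++ [cs]) = max (pvMax rows) cs.length := by
  simp [pvMax]

lemma pv_col_concat (rows : List (List Char)) (cs : List Char) (j : Nat) :
    pvCol (rows ++ [cs]) j = pvCol rows j ++ (cs[j]?).toList := by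
  simp [pvCol, List.filterMap_append, List.filterMap]
  cases cs[j]? <;> simp

-- the characterisation of A's dict after the whole outer loop: keys 0 … maxlen-1, value j = column j
lemma pv_dict_items (arr : List String) :
    (arr.foldl (fun d words => pvInnerA words.toList d) PySem.Dict.empty).items
    = (List.range (pvMax (arr.map String.toList))).map
        (fun (j : Nat) => ((j : Int), pvCol (arr.map String.toList) j)) := by
  induction arr using List.reverseRecOn with
  | nil => simp [pvMax, pvCol, PySem.Dict.empty]
  | append_singleton arr w ih =>
    rw [List.foldl_concat]
    refine Eq.trans (pv_inner_fold w.toList (pvMax (arr.map String.toList))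
      (pvCol (arr.map String.toList)) w.toList.length _ ih) ?_
    rw [List.map_append]
    simp only [List.map_cons, List.map_nil]
    rw [pv_max_concat]
    apply List.map_congr_left
    intro j hj
    rw [pv_col_concat]
    congr 1
    congr 1
    · by_cases h2 : j < pvMax (arr.map String.toList)
      · simp [h2]
      · simp [h2, pv_col_past (arr.map String.toList) j (by omega)]
    · by_cases h3 : j < w.toList.length
      · simp [PySem.List.pyGet?_natCast]
      · simp [List.getElem?_eq_none (by omega : w.toList.length ≤ j)]

-- ===== VERDICT (by name: the statement is the Claim_ definition above) =====
theorem char_cascade_spec : Claim_equal_char_cascade := by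
  intro arr _
  unfold Spec_char_cascade
  simp only [char_cascade, char_cascade_alt]
  have hitems := pv_dict_items arr
  set D := arr.foldl (fun d words => pvInnerA words.toList d) PySem.Dict.empty with hD
  set rows := arr.map String.toList
  set K := pvMax rows
  congr 1
  have hkeys : D.keys = (List.range K).map (fun (j : Nat) => (j : Int)) := by
    simp [PySem.Dict.keys, hitems, List.map_map]
  rw [hkeys, List.foldl_map]
  rw [PySem.List.foldl_congr_mem (List.range K) _ (fun s j => s ++ pvCol rows j) []
      (fun acc j hj => by
        rw [pv_getD_shape K (pvCol rows) D hitems j (List.mem_range.mp hj)])]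
  rw [PySem.List.foldl_append_eq_flatMap (pvCol rows) (List.range K) []]
  simp [List.flatMap_def]
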